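-- pv_equiv track=rewrite | github.com/aishwaryadevi-04/usb_authentication | encrypt.py | encrypt_device_id
-- ===== SOURCE A (Python) =====
-- def encrypt_device_id(device_id):
--     key = sum(ord(char) for char in device_id) % 26 + 1  # Device-specific encryption key
--     encrypted_id = ""
--
--     for char in device_id:
--         if char.isalnum():
--             if char.isupper():
--                 encrypted_char = chr((ord(char) + key - 65) % 26 + 65)
--             else:
--                 encrypted_char = chr((ord(char) + key - 97) % 26 + 97)
--         else:
--             encrypted_char = char
--         encrypted_id += encrypted_char
--
--     return encrypted_id
-- ===== SOURCE B (Python) =====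
-- def encrypt_device_id(device_id):
--     key = sum(map(ord, device_id)) % 26 + 1
--     table = {}
--     for c in set(device_id):
--         if c.isalnum():
--             base = 65 if c.isupper() else 97
--             table[ord(c)] = chr(base + (ord(c) - base + key) % 26)
--     return device_id.translate(table)
-- ===== Notes on version B (the rewrite author's own statement) =====
-- stated objective: idiomatic
-- what changed: Replaces the per-character string-appending loop with a sparse ord-keyed translation table built only over the distinct alphanumeric characters (one shared base+offset rotation formula) plus a single str.translate pass; non-alnum characters pass through by being absent from the table.
import Mathlib
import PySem

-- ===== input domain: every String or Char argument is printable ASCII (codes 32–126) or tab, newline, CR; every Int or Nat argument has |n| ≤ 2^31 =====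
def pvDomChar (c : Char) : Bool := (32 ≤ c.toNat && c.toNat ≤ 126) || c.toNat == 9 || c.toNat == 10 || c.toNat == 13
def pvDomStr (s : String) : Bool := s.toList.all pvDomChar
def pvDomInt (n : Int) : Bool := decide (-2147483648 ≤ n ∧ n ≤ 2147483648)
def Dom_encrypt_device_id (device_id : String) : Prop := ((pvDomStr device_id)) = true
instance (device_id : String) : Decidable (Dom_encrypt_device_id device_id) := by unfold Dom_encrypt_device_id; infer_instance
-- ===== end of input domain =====

-- B replaces A's per-character append loop by a sparse ord-keyed translation table built
-- only over the distinct alphanumeric characters (shared base+offset formula), then one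
-- translate pass that leaves unmapped characters unchanged (idiomatic).


-- ===== PORT A =====
-- the per-character step of A's loop body (nested ifs, two chr formulas, as in A)
def pvEncChar (key : Int) (c : Char) : Char :=
  if PySem.Chars.isalnum c then
    if PySem.Chars.isupper c then
      Char.ofNat (PySem.Int.mod ((c.toNat : Int) + key - 65) 26 + 65).toNat
    else
      Char.ofNat (PySem.Int.mod ((c.toNat : Int) + key - 97) 26 + 97).toNat
  else c

def encrypt_device_id (device_id : String) : String :=
  let key : Int := PySem.Int.mod (device_id.toList.foldl (fun a c => a + (c.toNat : Int)) 0) 26 + 1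
  -- encrypted_id += encrypted_char, over List Char (String.append is kernel-opaque)
  String.ofList (device_id.toList.foldl (fun acc c => acc ++ [pvEncChar key c]) [])

-- ===== PORT B =====
-- B's single rotation formula: base + (ord(c) - base + key) % 26, base chosen by case
def pvRotB (key : Int) (c : Char) : Char :=
  let base : Int := if PySem.Chars.isupper c then 65 else 97
  Char.ofNat (base + PySem.Int.mod ((c.toNat : Int) - base + key) 26).toNat

def encrypt_device_id_alt (device_id : String) : String :=
  let key : Int := PySem.Int.mod (device_id.toList.map (fun c => (c.toNat : Int))).sum 26 + 1
  -- table = {ord(c): rot(c) for c in set(device_id) if c.isalnum()}; only alnum chars get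
  -- an entry; lookup is order-independent, so set iteration order does not matter
  let table : PySem.Dict Int Char :=
    (PySem.Set.ofList device_id.toList).foldl
      (fun d c => if PySem.Chars.isalnum c then d.insert (c.toNat : Int) (pvRotB key c) else d)
      PySem.Dict.empty
  -- device_id.translate(table): chars whose ordinal is absent from the table pass through
  String.ofList (device_id.toList.map (fun c => (table.get? (c.toNat : Int)).getD c))

-- ===== PRECONDITION & SPEC =====
def Spec_encrypt_device_id (device_id : String) (out : String) : Prop := out = encrypt_device_id_alt device_id
instance (device_id : String) (out : String) : Decidable (Spec_encrypt_device_id device_id out) := by unfold Spec_encrypt_device_id; infer_instance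

-- ===== CLAIM (what is proved, stated in full; the proofs are below) =====
def Claim_equal_encrypt_device_id : Prop := ∀ (device_id : String), Dom_encrypt_device_id device_id → Spec_encrypt_device_id device_id (encrypt_device_id device_id)

-- ===== LEMMAS AND PROOFS =====

-- B's single formula agrees with A's two-branch formula on alphanumeric characters
theorem pvRotB_eq (key : Int) (c : Char) (h : PySem.Chars.isalnum c = true) :
    pvRotB key c = pvEncChar key c := by
  unfold pvRotB pvEncChar PySem.Int.mod
  simp only [h, if_true]
  by_cases hu : PySem.Chars.isupper c = true
  · simp only [hu, if_true]
    have h1 : (c.toNat : Int) + key - 65 = (c.toNat : Int) - 65 + key := by ring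
    rw [h1, Int.add_comm]
  · simp only [hu, if_false, Bool.false_eq_true]
    have h1 : (c.toNat : Int) + key - 97 = (c.toNat : Int) - 97 + key := by ring
    rw [h1, Int.add_comm]

-- the conditional-insert fold over chars none of whose ordinals equal j leaves get? j alone
theorem pvGet?_fold_of_not_hit (key : Int) (l : List Char) (d : PySem.Dict Int Char) (j : Int)
    (h : ∀ x ∈ l, PySem.Chars.isalnum x = true → (x.toNat : Int) ≠ j) :
    ((l.foldl (fun d c => if PySem.Chars.isalnum c then d.insert (c.toNat : Int) (pvRotB key c) else d) d).get? j)
      = d.get? j := by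
  induction l generalizing d with
  | nil => rfl
  | cons x xs ih =>
    simp only [List.foldl_cons]
    rw [ih _ (fun y hy => h y (List.mem_cons_of_mem _ hy))]
    by_cases hx : PySem.Chars.isalnum x = true
    · simp only [hx, if_true]
      exact PySem.Dict.get?_insert_of_ne _ _ (fun hj => h x (List.mem_cons_self ..) hx hj.symm)
    · simp [hx]

-- equal ordinals are equal characters
theorem pvOrd_inj {x c : Char} (h : (x.toNat : Int) = (c.toNat : Int)) : x = c := by
  have h2 : x.toNat = c.toNat := by exact_mod_cast h
  unfold Char.toNat at h2
  exact Char.ext (UInt32.toNat_inj.mp h2)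

-- lookup of an alnum char's ordinal in the table built over a duplicate-free char list
theorem pvGet?_table (key : Int) (l : List Char) (d : PySem.Dict Int Char)
    (hnd : l.Nodup) (c : Char) (hc : c ∈ l) (hal : PySem.Chars.isalnum c = true) :
    ((l.foldl (fun d x => if PySem.Chars.isalnum x then d.insert (x.toNat : Int) (pvRotB key x) else d) d).get? (c.toNat : Int))
      = some (pvRotB key c) := by
  induction l generalizing d with
  | nil => cases hc
  | cons x xs ih =>
    simp only [List.foldl_cons]
    rcases List.mem_cons.mp hc with h | h
    · subst h
      rw [pvGet?_fold_of_not_hit _ _ _ _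
        (fun y hy _ hj => (List.nodup_cons.mp hnd).1 (by rw [← pvOrd_inj hj]; exact hy))]
      simp [hal, PySem.Dict.get?_insert_self]
    · exact ih _ (List.nodup_cons.mp hnd).2 h

-- ===== VERDICT (by name: the statement is the Claim_ definition above) =====
theorem encrypt_device_id_spec : Claim_equal_encrypt_device_id := by
  intro s _
  unfold Spec_encrypt_device_id encrypt_device_id encrypt_device_id_alt
  simp only []
  rw [PySem.List.foldl_add, PySem.List.foldl_append_singleton_eq_map]
  congr 1
  apply List.map_congr_left
  intro c hc
  by_cases hal : PySem.Chars.isalnum c = true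
  · rw [pvGet?_table _ _ _ (PySem.Set.nodup_ofList _) c ((PySem.Set.mem_ofList _ _).mpr hc) hal]
    simp [pvRotB_eq _ _ hal]
  · rw [pvGet?_fold_of_not_hit _ _ _ _ (fun y _ hy hj => hal (by rw [← pvOrd_inj hj]; exact hy))]
    simp [pvEncChar, hal, PySem.Dict.empty, PySem.Dict.get?]
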